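-- pv_equiv track=rewrite | github.com/AndreasMuehlmann/straisol | main.py | give_numbers_v
-- ===== SOURCE A (Python) =====
-- def give_numbers_v(straights, static_index, search_range):
--     numbers = []
--     numbers_in_bound = []
--     in_bound = True
--     free_squares = 0
--     for changing_index in search_range:
--         if straights[changing_index][static_index].isdigit():
--             numbers.append(int(straights[changing_index][static_index]))
--             if in_bound:
--                 numbers_in_bound.append(int(straights[changing_index][static_index]))
--
--         elif straights[changing_index][static_index] == '.':
--             in_bound = False
--             continue
--
--         elif len(straights[changing_index][static_index]) == 2:
--             numbers.append(int(straights[changing_index][static_index][1]))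
--             in_bound = False
--             continue
--
--         elif in_bound:
--             free_squares += 1
--
--     return numbers, numbers_in_bound, free_squares
-- ===== SOURCE B (Python) =====
-- def give_numbers_v(straights, static_index, search_range):
--     # Two-phase decomposition: extract the cell column once, find the in-bound
--     # boundary, then compute each result from whole-list / prefix passes.
--     cells = [straights[ci][static_index] for ci in search_range]
--
--     boundary = len(cells)
--     for i, cell in enumerate(cells):
--         if cell == '.' or (not cell.isdigit() and len(cell) == 2):
--             boundary = i
--             break
--
--     numbers = []
--     for cell in cells:
--         if cell.isdigit():
--             numbers.append(int(cell))
--         elif len(cell) == 2: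
--             numbers.append(int(cell[1]))
--
--     prefix = cells[:boundary]
--     numbers_in_bound = [int(cell) for cell in prefix if cell.isdigit()]
--     free_squares = sum(1 for cell in prefix if not cell.isdigit())
--     return numbers, numbers_in_bound, free_squares
-- ===== Notes on version B (the rewrite author's own statement) =====
-- stated objective: alternative
-- what changed: A's single stateful loop carrying four accumulators and an in_bound flag is replaced by a phase decomposition: extract the cell column once, locate the first boundary cell ('.' or non-digit length-2), then compute numbers from a whole-list pass and numbers_in_bound/free_squares from independent passes over the prefix before the boundary.
import Mathlib
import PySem

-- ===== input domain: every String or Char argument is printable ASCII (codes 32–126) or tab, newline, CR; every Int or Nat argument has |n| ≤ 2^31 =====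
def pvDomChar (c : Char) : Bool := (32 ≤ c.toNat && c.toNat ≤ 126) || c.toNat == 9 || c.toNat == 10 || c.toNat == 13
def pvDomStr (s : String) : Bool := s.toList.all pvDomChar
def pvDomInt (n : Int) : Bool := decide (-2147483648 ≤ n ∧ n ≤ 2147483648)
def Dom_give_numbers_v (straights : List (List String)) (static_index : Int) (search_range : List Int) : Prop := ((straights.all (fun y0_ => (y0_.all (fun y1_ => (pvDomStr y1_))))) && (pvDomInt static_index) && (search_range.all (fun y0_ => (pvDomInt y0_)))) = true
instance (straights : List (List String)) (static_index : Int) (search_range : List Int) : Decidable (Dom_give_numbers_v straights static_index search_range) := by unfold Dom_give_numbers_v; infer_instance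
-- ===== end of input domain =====

-- B replaces A's single stateful loop by a boundary scan plus independent whole-list/prefix passes (same cost; objective: alternative decomposition).

-- shared cell access straights[ci][static_index]; the .getD defaults never fire inside Pre_ (IndexError is excluded there)
def pvCell (straights : List (List String)) (static_index : Int) (ci : Int) : String :=
  (PySem.List.pyGet? ((PySem.List.pyGet? straights ci).getD []) static_index).getD ""

-- int(cell); inside Pre_ this is only applied to strings with cell.isdigit() == True, where int() succeeds
def pvInt (cell : String) : Int := (PySem.Int.ofStr? cell).getD 0

-- int(cell[1]); inside Pre_ only applied where cell[1] is a digit, where int() succeeds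
def pvInt1 (cell : String) : Int :=
  ((PySem.Str.pyGet? cell 1).bind (fun ch => PySem.Int.ofChars? [ch])).getD 0

-- ===== PORT A =====
-- A's loop body on the state (numbers, numbers_in_bound, in_bound, free_squares)
def pvStepA (st : List Int × List Int × Bool × Int) (cell : String) : List Int × List Int × Bool × Int :=
  let (numbers, nib, in_bound, free) := st
  if PySem.Str.strIsdigit cell then
    (numbers ++ [pvInt cell], if in_bound then nib ++ [pvInt cell] else nib, in_bound, free)
  else if cell == "." then (numbers, nib, false, free)
  else if PySem.Str.len cell == 2 then (numbers ++ [pvInt1 cell], nib, false, free)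
  else if in_bound then (numbers, nib, in_bound, free + 1)
  else (numbers, nib, in_bound, free)

def give_numbers_v (straights : List (List String)) (static_index : Int) (search_range : List Int) : List Int × List Int × Int :=
  let st := search_range.foldl (fun st ci => pvStepA st (pvCell straights static_index ci)) ([], [], true, 0)
  (st.1, st.2.1, st.2.2.2)

-- ===== PORT B =====
-- 'if cell == '.' or (not cell.isdigit() and len(cell) == 2)'
def pvBdry (cell : String) : Bool :=
  cell == "." || (!PySem.Str.strIsdigit cell && PySem.Str.len cell == 2)

-- the enumerate/break scan: index of the first boundary cell, length if none
def pvFirstBoundary : List String → Nat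
  | [] => 0
  | c :: rest => if pvBdry c then 0 else pvFirstBoundary rest + 1

-- the 'numbers' loop body of Source B
def pvNumStep (acc : List Int) (cell : String) : List Int :=
  if PySem.Str.strIsdigit cell then acc ++ [pvInt cell]
  else if PySem.Str.len cell == 2 then acc ++ [pvInt1 cell]
  else acc

def give_numbers_v_alt (straights : List (List String)) (static_index : Int) (search_range : List Int) : List Int × List Int × Int :=
  let cells := search_range.map (pvCell straights static_index)
  let boundary := pvFirstBoundary cells
  let numbers := cells.foldl pvNumStep []
  let prefx := cells.take boundary        -- cells[:boundary], boundary nonnegative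
  let numbers_in_bound := (prefx.filter (fun c => PySem.Str.strIsdigit c)).map pvInt
  let free_squares : Int := (prefx.countP (fun c => !PySem.Str.strIsdigit c) : Nat)
  (numbers, numbers_in_bound, free_squares)

-- ===== PRECONDITION & SPEC =====
-- Pre_ excludes exactly the inputs where Python A raises: an IndexError on straights[ci][static_index],
-- or a ValueError from int(cell[1]) on a non-digit length-2 cell whose second character is not a digit.
def pvCellOk (straights : List (List String)) (static_index : Int) (ci : Int) : Bool :=
  match (PySem.List.pyGet? straights ci).bind (fun row => PySem.List.pyGet? row static_index) with
  | none => false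
  | some cell =>
      PySem.Str.strIsdigit cell || cell == "." || PySem.Str.len cell != 2 ||
        (match cell.toList[1]? with
         | some ch => PySem.Chars.isdigit ch
         | none => false)

def Pre_give_numbers_v (straights : List (List String)) (static_index : Int) (search_range : List Int) : Prop :=
  ∀ ci ∈ search_range, pvCellOk straights static_index ci = true
instance (straights : List (List String)) (static_index : Int) (search_range : List Int) : Decidable (Pre_give_numbers_v straights static_index search_range) := by unfold Pre_give_numbers_v; infer_instance

def pvWitness_give_numbers_v : List (List String) × Int × List Int :=
  ([["3"], ["x"], ["."], ["#5"]], 0, [0, 1, 2, 3])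

def Spec_give_numbers_v (straights : List (List String)) (static_index : Int) (search_range : List Int) (out : List Int × List Int × Int) : Prop := out = give_numbers_v_alt straights static_index search_range
instance (straights : List (List String)) (static_index : Int) (search_range : List Int) (out : List Int × List Int × Int) : Decidable (Spec_give_numbers_v straights static_index search_range out) := by unfold Spec_give_numbers_v; infer_instance

-- ===== CLAIM (what is proved, stated in full; the proofs are below) =====
def Claim_equal_give_numbers_v : Prop := ∀ (straights : List (List String)) (static_index : Int) (search_range : List Int), Dom_give_numbers_v straights static_index search_range → Pre_give_numbers_v straights static_index search_range → Spec_give_numbers_v straights static_index search_range (give_numbers_v straights static_index search_range)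

-- ===== LEMMAS AND PROOFS =====

theorem dot_not_digit : PySem.Chars.strIsdigit ['.'] = false := by decide

theorem foldl_stepA_false (cells : List String) (ns nib : List Int) (fs : Int) :
    cells.foldl pvStepA (ns, nib, false, fs) = (cells.foldl pvNumStep ns, nib, false, fs) := by
  induction cells generalizing ns with
  | nil => rfl
  | cons c rest ih =>
      simp only [List.foldl_cons, pvStepA, pvNumStep]
      by_cases hd : PySem.Chars.strIsdigit c.toList = true
      · simp [hd, ih]
      · by_cases hdot : c = "."
        · subst hdot; simp [dot_not_digit, ih]
        · by_cases h2 : (c.length : Int) = 2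
          · simp [hd, hdot, h2, ih]
          · simp [hd, hdot, h2, ih]

theorem foldl_stepA_true (cells : List String) (ns nib : List Int) (fs : Int) :
    cells.foldl pvStepA (ns, nib, true, fs) =
      (cells.foldl pvNumStep ns,
       nib ++ ((cells.take (pvFirstBoundary cells)).filter (fun c => PySem.Chars.strIsdigit c.toList)).map pvInt,
       !cells.any pvBdry,
       fs + ((cells.take (pvFirstBoundary cells)).countP (fun c => !PySem.Chars.strIsdigit c.toList) : Nat)) := by
  induction cells generalizing ns nib fs with
  | nil => simp [pvFirstBoundary]
  | cons c rest ih =>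
      by_cases hd : PySem.Chars.strIsdigit c.toList = true
      · -- digit cell: not a boundary cell
        have hdot : c ≠ "." := by
          intro hc; subst hc; exact absurd hd (by decide)
        have hb : pvBdry c = false := by simp [pvBdry, hd, hdot]
        have hfb : pvFirstBoundary (c :: rest) = pvFirstBoundary rest + 1 := by
          simp [pvFirstBoundary, hb]
        simp [List.foldl_cons, pvStepA, hd, ih, hfb, hb, pvNumStep]
      · by_cases hdot : c = "."
        · -- the '.' boundary cell
          subst hdot
          have hbd : pvBdry "." = true := by simp [pvBdry]
          have hfb : pvFirstBoundary ("." :: rest) = 0 := by simp [pvFirstBoundary, hbd]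
          simp [List.foldl_cons, pvStepA, dot_not_digit, foldl_stepA_false, hfb, pvNumStep, hbd]
        · by_cases h2 : (c.length : Int) = 2
          · -- non-digit length-2 boundary cell
            have hbd : pvBdry c = true := by simp [pvBdry, hd, h2]
            have hfb : pvFirstBoundary (c :: rest) = 0 := by simp [pvFirstBoundary, hbd]
            simp [List.foldl_cons, pvStepA, hd, hdot, h2, foldl_stepA_false, hfb, pvNumStep, hbd]
          · -- free square: neither a digit nor a boundary cell
            have hbd : pvBdry c = false := by simp [pvBdry, hd, hdot, h2]
            have hfb : pvFirstBoundary (c :: rest) = pvFirstBoundary rest + 1 := by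
              simp [pvFirstBoundary, hbd]
            simp only [List.foldl_cons, pvStepA, hfb, List.take_succ_cons, List.filter_cons,
              List.any_cons, List.countP_cons, hbd, pvNumStep]
            simp [hd, hdot, h2]
            rw [ih]
            refine congrArg _ (congrArg _ (congrArg _ ?_))
            omega

-- ===== VERDICT (by name: the statement is the Claim_ definition above) =====
theorem give_numbers_v_spec : Claim_equal_give_numbers_v := by
  intro straights static_index search_range _hDom _hPre
  unfold Spec_give_numbers_v give_numbers_v give_numbers_v_alt
  rw [← List.foldl_map (f := pvCell straights static_index) (g := pvStepA)]
  rw [foldl_stepA_true]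
  simp
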